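-- pv_equiv track=rewrite | github.com/mariam123-0/Spam-Detiction | SpamDetection/app.py | predict_spam
-- ===== SOURCE A (Python) =====
-- def predict_spam(text: str) -> bool:
--     """
--     Detect if a message is spam based on keyword matching
--
--     Args:
--         text: Input message text
--
--     Returns:
--         bool: True if spam, False if not spam
--     """
--     spam_keywords = [
--         "free", "win", "cash", "offer", "buy now", "click", "credit",
--         "prize", "urgent", "congratulations", "limited time", "guaranteed",
--         "earn money", "no risk", "act now", "winner", "claim", "discount",
--         "deal", "promotion", "lottery", "million", "dollars", "password",
--         "verify", "account", "suspended", "risk"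
--     ]
--
--     text_lower = text.lower()
--
--     for keyword in spam_keywords:
--         if keyword in text_lower:
--             return True
--
--     return False
-- ===== SOURCE B (Python) =====
-- _SPAM_KEYWORDS = [
--     "free", "win", "cash", "offer", "buy now", "click", "credit",
--     "prize", "urgent", "congratulations", "limited time", "guaranteed",
--     "earn money", "no risk", "act now", "winner", "claim", "discount",
--     "deal", "promotion", "lottery", "million", "dollars", "password",
--     "verify", "account", "suspended", "risk"
-- ]
--
--
-- def predict_spam(text: str) -> bool:
--     """Position-major scan: walk the lowered text once; at each position
--     test whether any keyword starts there (instead of one full substring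
--     search per keyword)."""
--     low = text.lower()
--     for i in range(len(low)):
--         if any(low.startswith(k, i) for k in _SPAM_KEYWORDS):
--             return True
--     return False
-- ===== Notes on version B (the rewrite author's own statement) =====
-- stated objective: alternative
-- what changed: Replaces the keyword-major loop (one full substring search per keyword) with a single position-major scan of the lowered text that tests all keywords as prefixes at each position.
import Mathlib
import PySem

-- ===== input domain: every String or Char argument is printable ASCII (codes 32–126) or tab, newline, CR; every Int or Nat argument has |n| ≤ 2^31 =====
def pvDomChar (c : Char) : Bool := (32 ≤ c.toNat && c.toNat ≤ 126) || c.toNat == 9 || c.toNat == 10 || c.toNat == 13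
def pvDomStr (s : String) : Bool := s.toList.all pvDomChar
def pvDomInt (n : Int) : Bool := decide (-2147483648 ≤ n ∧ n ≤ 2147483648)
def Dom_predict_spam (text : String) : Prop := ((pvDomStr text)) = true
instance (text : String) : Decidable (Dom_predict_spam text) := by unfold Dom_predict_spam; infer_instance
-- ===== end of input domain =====

-- B replaces A's keyword-major loop with a single position-major scan of the
-- lowered text testing all keywords as prefixes at each position (alternative).

-- ===== PORT A =====
def pvSpamKeywords : List String :=
  ["free", "win", "cash", "offer", "buy now", "click", "credit",
   "prize", "urgent", "congratulations", "limited time", "guaranteed",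
   "earn money", "no risk", "act now", "winner", "claim", "discount",
   "deal", "promotion", "lottery", "million", "dollars", "password",
   "verify", "account", "suspended", "risk"]

-- A's 'for keyword in spam_keywords: if keyword in text_lower: return True'
def pvLoopA (kws : List String) (low : String) : Bool :=
  match kws with
  | [] => false
  | k :: rest => if PySem.Str.isIn k low then true else pvLoopA rest low

def predict_spam (text : String) : Bool :=
  pvLoopA pvSpamKeywords (PySem.Str.lower text)

-- ===== PORT B =====
-- keywords as char lists (B checks them position by position)
def pvSpamKeywordsB : List (List Char) := pvSpamKeywords.map String.toList

-- B's 'for i in range(len(low)): if any(low.startswith(k, i) ...): return True'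
-- (the suffix low[i:] drives the recursion: one step per position i)
def pvScanB (kws : List (List Char)) : List Char → Bool
  | [] => false
  | c :: t =>
    if kws.any (fun k => PySem.Chars.startswith (c :: t) k) then true
    else pvScanB kws t

def predict_spam_alt (text : String) : Bool :=
  pvScanB pvSpamKeywordsB (PySem.Str.lower text).toList

-- ===== PRECONDITION & SPEC =====
def Spec_predict_spam (text : String) (out : Bool) : Prop := out = predict_spam_alt text
instance (text : String) (out : Bool) : Decidable (Spec_predict_spam text out) := by unfold Spec_predict_spam; infer_instance

-- ===== CLAIM (what is proved, stated in full; the proofs are below) =====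
def Claim_equal_predict_spam : Prop := ∀ (text : String), Dom_predict_spam text → Spec_predict_spam text (predict_spam text)

-- ===== LEMMAS AND PROOFS =====

-- A's early-return loop is List.any of substring containment
theorem pvLoopA_eq_any (kws : List String) (low : String) :
    pvLoopA kws low = kws.any (fun k => PySem.Str.isIn k low) := by
  induction kws with
  | nil => rfl
  | cons k rest ih =>
    simp only [pvLoopA, List.any_cons, ih]
    split_ifs with h
    · rw [h, Bool.true_or]
    · rw [Bool.not_eq_true] at h; rw [h, Bool.false_or]

-- B's position scan is true iff some keyword is a prefix of some suffix
theorem pvScanB_eq_true_iff (kws : List (List Char)) (cs : List Char)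
    (hne : ∀ k ∈ kws, k ≠ []) :
    pvScanB kws cs = true ↔ ∃ k ∈ kws, ∃ j, k <+: cs.drop j := by
  induction cs with
  | nil =>
    simp only [pvScanB, List.drop_nil, Bool.false_eq_true, false_iff, not_exists]
    rintro k ⟨hk, j, hp⟩
    exact absurd (List.prefix_nil.mp hp) (hne k hk)
  | cons c t ih =>
    simp only [pvScanB]
    split_ifs with h
    · simp only [true_iff]
      rw [List.any_eq_true] at h
      obtain ⟨k, hk, hs⟩ := h
      exact ⟨k, hk, 0, (PySem.Chars.startswith_iff _ _).mp hs⟩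
    · rw [ih]
      constructor
      · rintro ⟨k, hk, j, hp⟩; exact ⟨k, hk, j + 1, hp⟩
      · rintro ⟨k, hk, j, hp⟩
        cases j with
        | zero =>
          exact absurd (List.any_eq_true.mpr
            ⟨k, hk, (PySem.Chars.startswith_iff _ _).mpr hp⟩) h
        | succ j => exact ⟨k, hk, j, hp⟩

theorem pvSpamKeywordsB_ne_nil : ∀ k ∈ pvSpamKeywordsB, k ≠ [] := by decide

-- ===== VERDICT (by name: the statement is the Claim_ definition above) =====
theorem predict_spam_spec : Claim_equal_predict_spam := by
  intro text _
  unfold Spec_predict_spam predict_spam predict_spam_alt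
  rw [pvLoopA_eq_any, Bool.eq_iff_iff, List.any_eq_true,
      pvScanB_eq_true_iff _ _ pvSpamKeywordsB_ne_nil]
  constructor
  · rintro ⟨k, hk, hin⟩
    rw [PySem.Str.isIn_eq, ← PySem.Chars.exists_prefix_drop_iff_isIn] at hin
    obtain ⟨j, hj⟩ := hin
    exact ⟨k.toList, List.mem_map_of_mem hk, j, hj⟩
  · rintro ⟨k, hk, j, hj⟩
    obtain ⟨s, hs, rfl⟩ := List.mem_map.mp hk
    refine ⟨s, hs, ?_⟩
    rw [PySem.Str.isIn_eq, ← PySem.Chars.exists_prefix_drop_iff_isIn]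
    exact ⟨j, hj⟩
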